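-- pv_equiv track=rewrite | github.com/piedro404/resolucoes-de-problemas | Maratona/2024/regional/H_Harmonics_with_Interference.py | decodePossibles
-- ===== SOURCE A (Python) =====
-- def decodePossibles(n, i=0, resp=""):
--     if i == len(n):
--         return [resp]
--
--     possibles = []
--
--     if n[i] == "*":
--         possibles += decodePossibles(n, i + 1, resp + "0")
--         possibles += decodePossibles(n, i + 1, resp + "1")
--     else:
--         possibles += decodePossibles(n, i + 1, resp + n[i])
--
--     return possibles
-- ===== SOURCE B (Python) =====
-- def decodePossibles(n, i=0, resp=""):
--     outs = [resp]
--     for j in range(i, len(n)):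
--         c = n[j]
--         if c == "*":
--             outs = [s + b for s in outs for b in "01"]
--         else:
--             outs = [s + c for s in outs]
--     return outs
-- ===== Notes on version B (the rewrite author's own statement) =====
-- stated objective: faster
-- what changed: Replaces the branching recursion that threads a growing prefix string through two recursive calls per wildcard with a single iterative left-to-right pass that maintains the list of all partial expansions, extending each partial string by the two binary digits at a wildcard and by the fixed character otherwise.
import Mathlib
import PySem

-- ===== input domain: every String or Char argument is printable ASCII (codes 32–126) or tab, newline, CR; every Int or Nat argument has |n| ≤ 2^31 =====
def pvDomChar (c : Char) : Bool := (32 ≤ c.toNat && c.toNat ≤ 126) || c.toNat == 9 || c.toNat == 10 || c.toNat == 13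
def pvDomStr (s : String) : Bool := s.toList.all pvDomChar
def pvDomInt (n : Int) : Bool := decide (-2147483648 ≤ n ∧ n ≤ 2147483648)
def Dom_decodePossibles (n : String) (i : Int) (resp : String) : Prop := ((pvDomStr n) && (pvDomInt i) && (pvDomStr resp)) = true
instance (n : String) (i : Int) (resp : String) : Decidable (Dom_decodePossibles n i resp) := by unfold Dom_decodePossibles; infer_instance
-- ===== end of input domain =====

-- B replaces A's branching recursion with one iterative pass maintaining all partial
-- expansions (objective: simpler); equal return values on Pre_ (A raises outside it).

-- ===== PORT A =====
-- literal port of A's recursion; resp is carried as List Char (Python string concatenation),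
-- converted to String exactly where A returns it; the 'none' branch is Python's IndexError
-- (excluded by Pre_).
def decodePossiblesGoA (cs : List Char) (i : Int) (resp : List Char) : List String :=
  if i = (cs.length : Int) then [String.mk resp]
  else
    match h : PySem.List.pyGet? cs i with
    | none => []   -- Python raises IndexError here (outside Pre_)
    | some c =>
      if c = '*' then
        decodePossiblesGoA cs (i + 1) (resp ++ ['0']) ++
        decodePossiblesGoA cs (i + 1) (resp ++ ['1'])
      else
        decodePossiblesGoA cs (i + 1) (resp ++ [c])
termination_by ((cs.length : Int) - i).toNat
decreasing_by
  all_goals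
    have hlt : i < (cs.length : Int) := by
      by_contra hge
      have : PySem.List.pyGet? cs i = none := by
        rw [PySem.List.pyGet?_eq_none_iff]
        intro hr
        exact hge hr.2
      simp [this] at h
    omega

def decodePossibles (n : String) (i : Int) (resp : String) : List String :=
  decodePossiblesGoA n.toList i resp.toList

-- ===== PORT B =====
-- literal port of Source B: a foldl over range(i, len(n)) carrying the list of partial
-- expansions (as List Char, joined to String at return, as above).
def decodePossiblesStep (cs : List Char) (outs : List (List Char)) (j : Int) : List (List Char) :=
  match PySem.List.pyGet? cs j with
  | none => []   -- Python raises IndexError here (outside Pre_)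
  | some c =>
    if c = '*' then outs.flatMap (fun s => [s ++ ['0'], s ++ ['1']])
    else outs.map (fun s => s ++ [c])

def decodePossibles_alt (n : String) (i : Int) (resp : String) : List String :=
  (((PySem.List.pyRange i (n.toList.length : Int) 1).foldl
      (decodePossiblesStep n.toList) [resp.toList]).map String.mk)

-- ===== PRECONDITION & SPEC =====
-- Pre_ is exactly where the Python A returns: -len(n) ≤ i ≤ len(n); outside it A raises IndexError.
def Pre_decodePossibles (n : String) (i : Int) (resp : String) : Prop :=
  -(n.toList.length : Int) ≤ i ∧ i ≤ (n.toList.length : Int)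
instance (n : String) (i : Int) (resp : String) : Decidable (Pre_decodePossibles n i resp) := by
  unfold Pre_decodePossibles; infer_instance

def pvWitness_decodePossibles : String × Int × String := ("1*0*", 0, "")

def Spec_decodePossibles (n : String) (i : Int) (resp : String) (out : List String) : Prop :=
  out = decodePossibles_alt n i resp
instance (n : String) (i : Int) (resp : String) (out : List String) : Decidable (Spec_decodePossibles n i resp out) := by
  unfold Spec_decodePossibles; infer_instance

-- ===== CLAIM (what is proved, stated in full; the proofs are below) =====
def Claim_equal_decodePossibles : Prop := ∀ (n : String) (i : Int) (resp : String), Dom_decodePossibles n i resp → Pre_decodePossibles n i resp → Spec_decodePossibles n i resp (decodePossibles n i resp)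

-- ===== LEMMAS AND PROOFS =====

-- B's step distributes over list append, so the whole fold does.
theorem decodePossibles_step_append (cs : List Char) (j : Int) (o₁ o₂ : List (List Char)) :
    decodePossiblesStep cs (o₁ ++ o₂) j =
      decodePossiblesStep cs o₁ j ++ decodePossiblesStep cs o₂ j := by
  cases h : PySem.List.pyGet? cs j with
  | none => simp [decodePossiblesStep, h]
  | some c => by_cases hs : c = '*' <;> simp [decodePossiblesStep, h, hs]

theorem decodePossibles_fold_append (cs : List Char) (js : List Int) (o₁ o₂ : List (List Char)) :
    js.foldl (decodePossiblesStep cs) (o₁ ++ o₂) =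
      js.foldl (decodePossiblesStep cs) o₁ ++ js.foldl (decodePossiblesStep cs) o₂ := by
  induction js generalizing o₁ o₂ with
  | nil => rfl
  | cons j js ih => simp [List.foldl, decodePossibles_step_append, ih]

-- main invariant: A's recursion from position i with prefix resp equals B's fold over range(i, len).
theorem decodePossibles_goA_eq (cs : List Char) :
    ∀ (k : Nat) (i : Int) (resp : List Char),
      -(cs.length : Int) ≤ i → i ≤ (cs.length : Int) → ((cs.length : Int) - i).toNat = k →
      decodePossiblesGoA cs i resp =
        ((PySem.List.pyRange i (cs.length : Int) 1).foldl
          (decodePossiblesStep cs) [resp]).map String.mk := by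
  intro k
  induction k with
  | zero =>
    intro i resp h₁ h₂ hk
    have hi : i = (cs.length : Int) := by omega
    rw [decodePossiblesGoA, if_pos hi, hi, PySem.List.pyRange_one_eq_nil (by omega)]
    rfl
  | succ k ih =>
    intro i resp h₁ h₂ hk
    have hi : i < (cs.length : Int) := by omega
    have hne : ¬ i = (cs.length : Int) := by omega
    obtain ⟨c, hc⟩ : ∃ c, PySem.List.pyGet? cs i = some c := by
      cases h : PySem.List.pyGet? cs i with
      | none =>
        rw [PySem.List.pyGet?_eq_none_iff] at h
        exact absurd ⟨h₁, hi⟩ h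
      | some c => exact ⟨c, rfl⟩
    rw [decodePossiblesGoA, if_neg hne, PySem.List.pyRange_one_cons hi]
    simp only [List.foldl]
    have hstep : decodePossiblesStep cs [resp] i =
        (if c = '*' then [resp ++ ['0']] ++ [resp ++ ['1']] else [resp ++ [c]]) := by
      by_cases hs : c = '*' <;> simp [decodePossiblesStep, hc, hs]
    rw [hstep]
    split
    · rename_i heq
      rw [hc] at heq; cases heq
    · rename_i c' heq
      rw [hc] at heq; injection heq with hcc; subst hcc
      by_cases hs : c = '*'
      · simp only [if_pos hs]
        rw [decodePossibles_fold_append,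
            ih (i + 1) (resp ++ ['0']) (by omega) (by omega) (by omega),
            ih (i + 1) (resp ++ ['1']) (by omega) (by omega) (by omega), List.map_append]
      · simp only [if_neg hs]
        rw [ih (i + 1) (resp ++ [c]) (by omega) (by omega) (by omega)]

-- ===== VERDICT (by name: the statement is the Claim_ definition above) =====
theorem decodePossibles_spec : Claim_equal_decodePossibles := by
  intro n i resp _ hpre
  unfold Spec_decodePossibles decodePossibles decodePossibles_alt
  exact decodePossibles_goA_eq n.toList _ i resp.toList hpre.1 hpre.2 rfl
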